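-- pv_equiv track=rewrite | github.com/AnkitAvi11/Data-Structures-And-Algorithms | Arrays/fairarray.py | fair_array
-- ===== SOURCE A (Python) =====
-- def clac_odd_even (arr : list) :
--     odd = 0;even = 0
--
--     for i in range(len(arr)) :
--         if i%2 == 0 :
--             even += arr[i]
--         else :
--             odd += arr[i]
--
--     return (odd, even)
--
-- def fair_array(arr : list) -> int :
--     count = 0
--
--     for i in range(len(arr)) :
--         odd, even = clac_odd_even(arr)
--
--         if i%2 == 0 :
--             if even - arr[i] == odd :
--                 count+=1
--
--         else :
--             if even == odd-arr[i] :
--                 count+=1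
--
--     return count
-- ===== SOURCE B (Python) =====
-- def fair_array(arr):
--     even = 0
--     odd = 0
--     for i, x in enumerate(arr):
--         if i % 2 == 0:
--             even += x
--         else:
--             odd += x
--     diff = even - odd
--     return sum(1 for i, x in enumerate(arr)
--                if x == (diff if i % 2 == 0 else -diff))
-- ===== Notes on version B (the rewrite author's own statement) =====
-- stated objective: faster
-- what changed: B computes the even-index and odd-index sums once before the loop and counts matches against their difference in a single enumerate pass, instead of A's recomputing both sums from scratch inside every iteration.
import Mathlib
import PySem

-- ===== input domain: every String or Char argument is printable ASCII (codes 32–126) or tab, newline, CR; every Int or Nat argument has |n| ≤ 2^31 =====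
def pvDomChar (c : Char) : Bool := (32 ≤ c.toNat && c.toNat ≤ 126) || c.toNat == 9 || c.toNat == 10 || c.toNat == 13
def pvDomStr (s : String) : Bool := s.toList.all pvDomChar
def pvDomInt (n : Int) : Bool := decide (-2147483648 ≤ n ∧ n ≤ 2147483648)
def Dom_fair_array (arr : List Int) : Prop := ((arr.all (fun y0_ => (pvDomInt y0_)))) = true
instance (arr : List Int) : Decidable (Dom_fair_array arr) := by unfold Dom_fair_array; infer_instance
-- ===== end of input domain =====

-- B computes the odd/even index sums once and counts in a single pass, instead of A's
-- recomputation of both sums inside every loop iteration.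

-- ===== PORT A =====
def clac_odd_even (arr : List Int) : Int × Int :=
  (PySem.List.pyRange 0 (arr.length : Int) 1).foldl
    (fun (s : Int × Int) i =>
      if PySem.Int.mod i 2 == 0 then (s.1, s.2 + PySem.List.pyGetD arr i 0)
      else (s.1 + PySem.List.pyGetD arr i 0, s.2)) (0, 0)

def fair_array (arr : List Int) : Int :=
  (PySem.List.pyRange 0 (arr.length : Int) 1).foldl
    (fun count i =>
      let oe := clac_odd_even arr
      if PySem.Int.mod i 2 == 0 then
        (if oe.2 - PySem.List.pyGetD arr i 0 == oe.1 then count + 1 else count)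
      else
        (if oe.2 == oe.1 - PySem.List.pyGetD arr i 0 then count + 1 else count)) 0

-- ===== PORT B =====
def fair_array_alt (arr : List Int) : Int :=
  let s := (PySem.List.enumerate arr 0).foldl
    (fun (p : Int × Int) q =>
      if PySem.Int.mod q.1 2 == 0 then (p.1 + q.2, p.2) else (p.1, p.2 + q.2)) (0, 0)
  let diff := s.1 - s.2
  (PySem.List.enumerate arr 0).foldl
    (fun c q =>
      if q.2 == (if PySem.Int.mod q.1 2 == 0 then diff else -diff) then c + 1 else c) 0

-- ===== PRECONDITION & SPEC =====
def Spec_fair_array (arr : List Int) (out : Int) : Prop := out = fair_array_alt arr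
instance (arr : List Int) (out : Int) : Decidable (Spec_fair_array arr out) := by unfold Spec_fair_array; infer_instance

-- ===== CLAIM (what is proved, stated in full; the proofs are below) =====
def Claim_equal_fair_array : Prop := ∀ (arr : List Int), Dom_fair_array arr → Spec_fair_array arr (fair_array arr)

-- ===== LEMMAS AND PROOFS =====

-- A pair-fold adding x j to the first component on even j is the component swap of the
-- fold adding it to the second component (B's (even, odd) pass vs A's (odd, even) pass).
lemma swap_fold (l : List Int) (x : Int → Int) (e o : Int) :
    l.foldl (fun (p : Int × Int) j =>
      if PySem.Int.mod j 2 == 0 then (p.1 + x j, p.2) else (p.1, p.2 + x j)) (e, o)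
    = ((l.foldl (fun (s : Int × Int) j =>
        if PySem.Int.mod j 2 == 0 then (s.1, s.2 + x j) else (s.1 + x j, s.2)) (o, e)).2,
       (l.foldl (fun (s : Int × Int) j =>
        if PySem.Int.mod j 2 == 0 then (s.1, s.2 + x j) else (s.1 + x j, s.2)) (o, e)).1) := by
  induction l generalizing e o with
  | nil => simp
  | cons a t ih =>
    simp only [List.foldl_cons]
    by_cases h : (PySem.Int.mod a 2 == 0) = true
    · simp only [if_pos h]; exact ih _ _
    · simp only [if_neg h]; exact ih _ _

-- B's first pass yields exactly A's clac_odd_even pair, with the components swapped.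
lemma alt_sums_eq_clac (arr : List Int) :
    (PySem.List.enumerate arr 0).foldl
      (fun (p : Int × Int) q =>
        if PySem.Int.mod q.1 2 == 0 then (p.1 + q.2, p.2) else (p.1, p.2 + q.2)) (0, 0)
    = ((clac_odd_even arr).2, (clac_odd_even arr).1) := by
  rw [PySem.List.enumerate_eq_map_pyRange (d := 0), List.foldl_map]
  simp only [clac_odd_even, PySem.List.len_eq]
  exact swap_fold _ _ 0 0

-- ===== VERDICT (by name: the statement is the Claim_ definition above) =====
theorem fair_array_spec : Claim_equal_fair_array := by
  intro arr _
  show fair_array arr = fair_array_alt arr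
  simp only [fair_array, fair_array_alt, alt_sums_eq_clac]
  rw [PySem.List.enumerate_eq_map_pyRange (d := 0), List.foldl_map]
  apply PySem.List.foldl_congr_mem
  intro c j _
  by_cases h : PySem.Int.mod j 2 == 0 <;>
    · simp only [h, if_true, beq_iff_eq]
      split_ifs <;> omega
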